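-- pv_equiv track=rewrite | github.com/Aashiq-Edavalapati/Data-Structures-and-Algorithms | Patterns/Greedy/_10_Can_Parenthesis_be_made_valid.py | canParenthesize
-- ===== SOURCE A (Python) =====
-- def canParenthesize(s):
--     # return helperGreedy(s, 0, 0) # Brute Force
--     min, max = 0, 0
--     for char in s:
--         if char == '(':
--             min += 1
--             max += 1
--         elif char == ')':
--             min -= 1
--             max -= 1
--         else:
--             min -= 1
--             max += 1
--         if min < 0: min = 0
--         if max < 0: return False
--
--     return min == 0
-- ===== SOURCE B (Python) =====
-- def canParenthesize(s):
--     chars = list(s)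
--     bal = 0
--     for ch in chars:
--         bal += -1 if ch == ')' else 1
--         if bal < 0:
--             return False
--     bal = 0
--     for ch in reversed(chars):
--         bal += -1 if ch == '(' else 1
--         if bal < 0:
--             return False
--     return True
-- ===== Notes on version B (the rewrite author's own statement) =====
-- stated objective: idiomatic
-- what changed: Replaced the single-pass min/max range greedy by the classic two-pass balance check: a left-to-right pass treating wildcards as openers and a right-to-left pass treating them as closers.
import Mathlib
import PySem

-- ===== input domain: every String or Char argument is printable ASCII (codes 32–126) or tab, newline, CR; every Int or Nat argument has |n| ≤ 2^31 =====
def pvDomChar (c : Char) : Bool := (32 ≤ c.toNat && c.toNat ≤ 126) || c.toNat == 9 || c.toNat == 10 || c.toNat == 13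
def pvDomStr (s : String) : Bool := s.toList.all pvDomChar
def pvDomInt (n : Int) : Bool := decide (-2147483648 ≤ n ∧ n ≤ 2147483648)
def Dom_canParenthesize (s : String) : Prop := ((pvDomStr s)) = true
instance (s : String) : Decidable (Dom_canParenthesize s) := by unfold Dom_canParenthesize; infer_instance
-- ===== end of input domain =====

-- B replaces A's single-pass min/max range greedy by the classic two-pass balance check
-- (wildcards read as '(' left-to-right, as ')' right-to-left); same result, similar cost.

-- ===== PORT A =====
-- A's loop over s with state (min, max), clamping min at 0 and bailing out when max < 0.
def pvGoA : List Char → Int → Int → Bool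
  | [], mn, _ => mn == 0
  | c :: rest, mn, mx =>
    let mn1 : Int := if c = '(' then mn + 1 else mn - 1
    let mx1 : Int := if c = '(' then mx + 1 else if c = ')' then mx - 1 else mx + 1
    let mn2 : Int := if mn1 < 0 then 0 else mn1
    if mx1 < 0 then false else pvGoA rest mn2 mx1

def canParenthesize (s : String) : Bool := pvGoA s.toList 0 0

-- ===== PORT B =====
-- forward pass: -1 for ')', +1 for anything else; fail as soon as the balance goes negative
def pvFwd : List Char → Int → Bool
  | [], _ => true
  | c :: r, b =>
    let b1 : Int := b + (if c = ')' then -1 else 1)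
    if b1 < 0 then false else pvFwd r b1

-- backward pass (over the reversed list): -1 for '(', +1 for anything else
def pvBwd : List Char → Int → Bool
  | [], _ => true
  | c :: r, b =>
    let b1 : Int := b + (if c = '(' then -1 else 1)
    if b1 < 0 then false else pvBwd r b1

def canParenthesize_alt (s : String) : Bool :=
  pvFwd s.toList 0 && pvBwd s.toList.reverse 0

-- ===== PRECONDITION & SPEC =====
def Spec_canParenthesize (s : String) (out : Bool) : Prop := out = canParenthesize_alt s
instance (s : String) (out : Bool) : Decidable (Spec_canParenthesize s out) := by unfold Spec_canParenthesize; infer_instance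

-- ===== CLAIM (what is proved, stated in full; the proofs are below) =====
def Claim_equal_canParenthesize : Prop := ∀ (s : String), Dom_canParenthesize s → Spec_canParenthesize s (canParenthesize s)

-- ===== LEMMAS AND PROOFS =====

-- weight of a char in A's min-counter: +1 for '(', -1 otherwise
def pvD (c : Char) : Int := if c = '(' then 1 else -1
-- weight in B's backward pass: -1 for '(', +1 otherwise
def pvE (c : Char) : Int := if c = '(' then -1 else 1

def pvSum (f : Char → Int) : List Char → Int
  | [] => 0
  | c :: t => f c + pvSum f t

-- max of pvD-sums over all suffixes (including the empty one)
def pvMsuf : List Char → Int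
  | [] => 0
  | c :: t => max (pvD c + pvSum pvD t) (pvMsuf t)

-- min of pvE-sums over all prefixes (including the empty one)
def pvMpre : List Char → Int
  | [] => 0
  | c :: t => min 0 (pvE c + pvMpre t)

-- A's clamped min-counter, isolated
def pvCF : List Char → Int → Int
  | [], mn => mn
  | c :: t, mn =>
    let mn1 : Int := if c = '(' then mn + 1 else mn - 1
    pvCF t (if mn1 < 0 then 0 else mn1)

theorem pvGoA_eq (l : List Char) : ∀ (mn mx : Int),
    pvGoA l mn mx = (pvFwd l mx && decide (pvCF l mn = 0)) := by
  induction l with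
  | nil =>
    intro mn mx
    by_cases h : mn = 0 <;> simp [pvGoA, pvFwd, pvCF, h]
  | cons c t ih =>
    intro mn mx
    simp only [pvGoA, pvFwd, pvCF]
    by_cases h1 : c = '(' <;> by_cases h2 : c = ')'
    · exact absurd (h1 ▸ h2) (by decide)
    · simp only [if_pos h1, if_neg h2]
      split
      · simp
      · exact ih _ _
    · simp only [if_neg h1, if_pos h2]
      have e : mx + -1 = mx - 1 := by ring
      rw [e]
      split
      · simp
      · exact ih _ _
    · simp only [if_neg h1, if_neg h2]
      split
      · simp
      · exact ih _ _

theorem pvMsuf_ge (l : List Char) : pvSum pvD l ≤ pvMsuf l ∧ 0 ≤ pvMsuf l := by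
  induction l with
  | nil => simp [pvSum, pvMsuf]
  | cons c t ih =>
    simp only [pvSum, pvMsuf]
    by_cases h1 : c = '(' <;> simp only [pvD, h1, reduceIte] <;> omega

theorem pvCF_eq (l : List Char) : ∀ (mn : Int), 0 ≤ mn →
    pvCF l mn = max (mn + pvSum pvD l) (pvMsuf l) := by
  induction l with
  | nil => intro mn h; simp [pvCF, pvSum, pvMsuf]; omega
  | cons c t ih =>
    intro mn h
    have hs := pvMsuf_ge t
    simp only [pvCF, pvSum, pvMsuf]
    by_cases h1 : c = '('
    · simp only [pvD, h1, reduceIte]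
      rw [if_neg (by omega : ¬ mn + 1 < 0), ih _ (by omega)]
      omega
    · simp only [pvD, h1, reduceIte]
      by_cases h0 : mn - 1 < 0
      · rw [if_pos h0, ih _ (by omega)]; omega
      · rw [if_neg h0, ih _ (by omega)]; omega

theorem pvMpre_nonpos (l : List Char) : pvMpre l ≤ 0 := by
  cases l <;> simp [pvMpre]

theorem pvBwd_iff (l : List Char) : ∀ (b : Int), 0 ≤ b →
    (pvBwd l b = true ↔ 0 ≤ b + pvMpre l) := by
  induction l with
  | nil => intro b h; simp [pvBwd, pvMpre]; omega
  | cons c t ih =>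
    intro b h
    have ht := pvMpre_nonpos t
    by_cases h1 : c = '('
    · simp only [pvBwd, pvMpre, pvE, h1, reduceIte]
      split
      · rename_i hneg
        constructor
        · intro hc; exact absurd hc (by simp)
        · intro hc; exfalso; omega
      · rename_i hpos
        rw [ih _ (by omega)]; omega
    · simp only [pvBwd, pvMpre, pvE, h1, reduceIte]
      split
      · rename_i hneg; exfalso; omega
      · rw [ih _ (by omega)]; omega

theorem pvSum_append (f : Char → Int) (l₁ l₂ : List Char) :
    pvSum f (l₁ ++ l₂) = pvSum f l₁ + pvSum f l₂ := by
  induction l₁ with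
  | nil => simp [pvSum]
  | cons c t ih => simp [pvSum, ih]; ring

theorem pvMpre_append_singleton (r : List Char) (c : Char) :
    pvMpre (r ++ [c]) = min (pvMpre r) (pvSum pvE r + pvE c) := by
  induction r with
  | nil => simp [pvMpre, pvSum]
  | cons a t ih => simp only [List.cons_append, pvMpre, pvSum, ih]; omega

theorem pvSum_reverse (f : Char → Int) (l : List Char) :
    pvSum f l.reverse = pvSum f l := by
  induction l with
  | nil => rfl
  | cons c t ih => simp [pvSum, List.reverse_cons, pvSum_append, ih]; ring

theorem pvE_eq_neg_pvD (c : Char) : pvE c = -pvD c := by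
  unfold pvE pvD; split <;> rfl

theorem pvSumE_eq (l : List Char) : pvSum pvE l = -pvSum pvD l := by
  induction l with
  | nil => rfl
  | cons c t ih => simp [pvSum, ih, pvE_eq_neg_pvD]; ring

theorem pvMpre_reverse (l : List Char) : pvMpre l.reverse = -pvMsuf l := by
  induction l with
  | nil => rfl
  | cons c t ih =>
    simp only [List.reverse_cons, pvMpre_append_singleton, ih, pvMsuf,
      pvSum_reverse, pvSumE_eq, pvE_eq_neg_pvD]
    omega

theorem pvBwd_reverse_eq (l : List Char) :
    pvBwd l.reverse 0 = decide (pvMsuf l = 0) := by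
  have h1 := pvBwd_iff l.reverse 0 le_rfl
  have h2 := pvMpre_reverse l
  have h3 := (pvMsuf_ge l).2
  cases hb : pvBwd l.reverse 0 with
  | true =>
    have := h1.mp hb
    symm; simp only [decide_eq_true_eq]; omega
  | false =>
    symm; simp only [decide_eq_false_iff_not]
    intro hms
    exact absurd (h1.mpr (by omega)) (by simp [hb])

-- ===== VERDICT (by name: the statement is the Claim_ definition above) =====
theorem canParenthesize_spec : Claim_equal_canParenthesize := by
  intro s _
  unfold Spec_canParenthesize canParenthesize canParenthesize_alt
  rw [pvGoA_eq, pvCF_eq _ _ le_rfl, pvBwd_reverse_eq]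
  have h := pvMsuf_ge s.toList
  have : max (0 + pvSum pvD s.toList) (pvMsuf s.toList) = pvMsuf s.toList := by omega
  rw [this]
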